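-- pv_equiv track=rewrite | github.com/TariqBlecher/tblenser | utils.py | turning_points
-- ===== SOURCE A (Python) =====
-- def turning_points(array):
--     ''' turning_points(array) -> min_indices, max_indices
--     Finds the turning points within an 1D array and returns the indices of the minimum and
--     maximum turning points in two separate lists.
--     '''
--     idx_max, idx_min = [], []
--
--     NEUTRAL, RISING, FALLING = range(3)
--     def get_state(a, b):
--         if a < b: return RISING
--         if a > b: return FALLING
--         return NEUTRAL
--
--     ps = get_state(array[0], array[1])
--     begin = 1
--     for i in range(2, len(array)):
--         s = get_state(array[i - 1], array[i])
--         if s != NEUTRAL: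
--             if ps != NEUTRAL and ps != s:
--                 if s == FALLING:
--                     idx_max.append((begin + i - 1) // 2)
--                 else:
--                     idx_min.append((begin + i - 1) // 2)
--             begin = i
--             ps = s
--     return idx_min, idx_max
-- ===== SOURCE B (Python) =====
-- def turning_points(array):
--     ''' turning_points(array) -> min_indices, max_indices
--     Plateau-compression reimplementation: one pass groups equal runs into
--     (value, start, end) plateaus, then each interior plateau strictly above
--     (below) both neighbours contributes its floor-midpoint to the max (min) list.
--     '''
--     plateaus = []
--     for i, v in enumerate(array):
--         if plateaus and plateaus[-1][0] == v:
--             plateaus[-1] = (v, plateaus[-1][1], i)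
--         else:
--             plateaus.append((v, i, i))
--     idx_min, idx_max = [], []
--     for left, cur, right in zip(plateaus, plateaus[1:], plateaus[2:]):
--         mid = (cur[1] + cur[2]) // 2
--         if left[0] < cur[0] and cur[0] > right[0]:
--             idx_max.append(mid)
--         elif left[0] > cur[0] and cur[0] < right[0]:
--             idx_min.append(mid)
--     return idx_min, idx_max
-- ===== Notes on version B (the rewrite author's own statement) =====
-- stated objective: alternative
-- what changed: Replaces A's direction-state machine (tracking previous slope and segment start across an index loop) by a two-phase plateau compression: one pass groups equal runs into (value,start,end) triples, then interior plateaus strictly above/below both neighbours yield their floor-midpoints.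
import Mathlib
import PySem

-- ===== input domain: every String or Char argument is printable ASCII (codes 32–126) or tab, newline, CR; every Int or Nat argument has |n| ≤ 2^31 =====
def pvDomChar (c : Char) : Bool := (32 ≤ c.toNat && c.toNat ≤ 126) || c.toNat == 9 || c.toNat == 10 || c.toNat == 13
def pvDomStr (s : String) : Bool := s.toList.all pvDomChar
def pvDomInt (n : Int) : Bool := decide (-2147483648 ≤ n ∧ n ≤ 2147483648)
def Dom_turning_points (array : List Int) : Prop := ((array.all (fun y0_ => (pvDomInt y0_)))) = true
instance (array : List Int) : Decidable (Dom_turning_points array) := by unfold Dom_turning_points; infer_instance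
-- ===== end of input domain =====

-- B replaces A's slope-state machine by plateau compression + interior-plateau scan; equal outputs on arrays of length ≥ 2 (A raises IndexError below that).

-- ===== PORT A =====
-- get_state(a, b): 0 = NEUTRAL, 1 = RISING, 2 = FALLING
def get_state (a b : Int) : Int := if a < b then 1 else if a > b then 2 else 0

-- the loop body; state = (idx_min, idx_max, ps, begin)
def stepA (st : List Int × List Int × Int × Int) (i a b : Int) :
    List Int × List Int × Int × Int :=
  let s := get_state a b
  if s ≠ 0 then
    if st.2.2.1 ≠ 0 ∧ st.2.2.1 ≠ s then
      if s = 2 then (st.1, st.2.1 ++ [PySem.Int.floordiv (st.2.2.2 + i - 1) 2], s, i)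
      else (st.1 ++ [PySem.Int.floordiv (st.2.2.2 + i - 1) 2], st.2.1, s, i)
    else (st.1, st.2.1, s, i)
  else st

def turning_points (array : List Int) : List Int × List Int :=
  let ps := get_state (PySem.List.pyGetD array 0 0) (PySem.List.pyGetD array 1 0)
  let st := (PySem.List.pyRange 2 (array.length : Int) 1).foldl
    (fun st i => stepA st i (PySem.List.pyGetD array (i - 1) 0) (PySem.List.pyGetD array i 0))
    (([], [], ps, 1) : List Int × List Int × Int × Int)
  (st.1, st.2.1)

-- ===== PORT B =====
-- plateau-compression step: extend the last plateau or open a new one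
def updP (acc : List (Int × Int × Int)) (iv : Int × Int) : List (Int × Int × Int) :=
  match acc.getLast? with
  | some (v, s, _) =>
      if v = iv.2 then acc.dropLast ++ [(v, s, iv.1)] else acc ++ [(iv.2, iv.1, iv.1)]
  | none => [(iv.2, iv.1, iv.1)]

-- classify one interior plateau b against its neighbours a, c
def stepB (acc : List Int × List Int)
    (t : (Int × Int × Int) × (Int × Int × Int) × (Int × Int × Int)) :
    List Int × List Int :=
  let mid := PySem.Int.floordiv (t.2.1.2.1 + t.2.1.2.2) 2
  if t.1.1 < t.2.1.1 ∧ t.2.1.1 > t.2.2.1 then (acc.1, acc.2 ++ [mid])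
  else if t.1.1 > t.2.1.1 ∧ t.2.1.1 < t.2.2.1 then (acc.1 ++ [mid], acc.2)
  else acc

def turning_points_alt (array : List Int) : List Int × List Int :=
  let plateaus := (PySem.List.enumerate array 0).foldl updP []
  (plateaus.zip ((PySem.List.slice plateaus (some 1) none).zip
      (PySem.List.slice plateaus (some 2) none))).foldl stepB ([], [])

-- ===== PRECONDITION & SPEC =====
-- A reads the first two elements before its loop: arrays of length < 2 raise IndexError.
def Pre_turning_points (array : List Int) : Prop := 2 ≤ array.length
instance (array : List Int) : Decidable (Pre_turning_points array) := by
  unfold Pre_turning_points; infer_instance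
def pvWitness_turning_points : List Int := ([1, 3, 2])

def Spec_turning_points (array : List Int) (out : List Int × List Int) : Prop :=
  out = turning_points_alt array
instance (array : List Int) (out : List Int × List Int) :
    Decidable (Spec_turning_points array out) := by unfold Spec_turning_points; infer_instance

-- ===== CLAIM (what is proved, stated in full; the proofs are below) =====
def Claim_equal_turning_points : Prop :=
  ∀ (array : List Int), Dom_turning_points array → Pre_turning_points array →
    Spec_turning_points array (turning_points array)

-- ===== LEMMAS AND PROOFS =====

-- A's loop as structural recursion over the tail (proof-only reformulation)
def loopA (st : List Int × List Int × Int × Int) (i prev : Int) :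
    List Int → List Int × List Int × Int × Int
  | [] => st
  | x :: r => loopA (stepA st i prev x) (i + 1) x r

-- plateau list of the suffix, current plateau has value v, start s, next index i
def platFrom (v s i : Int) : List Int → List (Int × Int × Int)
  | [] => [(v, s, i - 1)]
  | x :: r => if x = v then platFrom v s (i + 1) r
              else (v, s, i - 1) :: platFrom x i (i + 1) r

-- B's interior scan as structural recursion on the plateau list (proof-only)
def scan3 (mn mx : List Int) : List (Int × Int × Int) → List Int × List Int
  | a :: b :: c :: r =>
      let mid := PySem.Int.floordiv (b.2.1 + b.2.2) 2
      if a.1 < b.1 ∧ b.1 > c.1 then scan3 mn (mx ++ [mid]) (b :: c :: r)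
      else if a.1 > b.1 ∧ b.1 < c.1 then scan3 (mn ++ [mid]) mx (b :: c :: r)
      else scan3 mn mx (b :: c :: r)
  | _ => (mn, mx)

lemma conv_loopA (rest : List Int) : ∀ (xs : List Int) (j : Nat) (prev : Int)
    (st : List Int × List Int × Int × Int), xs.drop j = prev :: rest →
    (PySem.List.pyRange ((j : Int) + 1) (xs.length : Int) 1).foldl
      (fun st i => stepA st i (PySem.List.pyGetD xs (i - 1) 0) (PySem.List.pyGetD xs i 0)) st
      = loopA st ((j : Int) + 1) prev rest := by
  induction rest with
  | nil =>
      intro xs j prev st h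
      have hlen : xs.length = j + 1 := by
        have := congrArg List.length h
        simp [List.length_drop] at this; omega
      rw [PySem.List.pyRange_one_eq_nil (by omega)]
      simp [loopA]
  | cons x r ih =>
      intro xs j prev st h
      have hlen : j + 2 ≤ xs.length := by
        have := congrArg List.length h
        simp [List.length_drop] at this; omega
      have hj : xs[j]? = some prev := by
        have : (xs.drop j)[0]? = some prev := by rw [h]; rfl
        simpa [List.getElem?_drop] using this
      have hj1 : xs[j + 1]? = some x := by
        have : (xs.drop j)[1]? = some x := by rw [h]; rfl
        simpa [List.getElem?_drop] using this
      have hg0 : PySem.List.pyGetD xs ((j : Int) + 1 - 1) 0 = prev := by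
        have := PySem.List.pyGetD_natCast xs j (0 : Int)
        simp only [show ((j : Int) + 1 - 1) = (j : Int) by ring]
        rw [this]; simp [List.getD, hj]
      have hg1 : PySem.List.pyGetD xs ((j : Int) + 1) 0 = x := by
        have := PySem.List.pyGetD_natCast xs (j + 1) (0 : Int)
        rw [show ((j : Int) + 1) = ((j + 1 : Nat) : Int) by push_cast; ring, this]
        simp [List.getD, hj1]
      rw [PySem.List.pyRange_one_cons (by exact_mod_cast by omega)]
      simp only [List.foldl_cons, hg0, hg1]
      have hdrop : xs.drop (j + 1) = x :: r := by
        have : (xs.drop j).drop 1 = x :: r := by rw [h]; rfl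
        simpa [List.drop_drop] using this
      have := ih xs (j + 1) x (stepA st ((j : Int) + 1) prev x) hdrop
      rw [show (((j + 1 : Nat) : Int) + 1) = ((j : Int) + 1 + 1) by push_cast; ring] at this
      rw [this, loopA]

lemma compress_eq (rest : List Int) : ∀ (acc : List (Int × Int × Int)) (v s i : Int),
    (PySem.List.enumerate rest i).foldl updP (acc ++ [(v, s, i - 1)])
      = acc ++ platFrom v s i rest := by
  induction rest with
  | nil => intro acc v s i; simp [PySem.List.enumerate_nil, platFrom]
  | cons x r ih =>
      intro acc v s i
      rw [PySem.List.enumerate_cons]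
      simp only [List.foldl_cons]
      by_cases hx : x = v
      · have : updP (acc ++ [(v, s, i - 1)]) (i, x) = acc ++ [(v, s, (i + 1) - 1)] := by
          simp [updP, hx]
        rw [this, ih acc v s (i + 1), platFrom, if_pos hx]
      · have : updP (acc ++ [(v, s, i - 1)]) (i, x)
            = (acc ++ [(v, s, i - 1)]) ++ [(x, i, (i + 1) - 1)] := by
          simp [updP]
          intro h; exact absurd h.symm hx
        rw [this, ih (acc ++ [(v, s, i - 1)]) x i (i + 1), platFrom, if_neg hx]
        simp

lemma zip3_scan (p : List (Int × Int × Int)) : ∀ (mn mx : List Int),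
    (p.zip ((p.drop 1).zip (p.drop 2))).foldl stepB (mn, mx) = scan3 mn mx p := by
  induction p with
  | nil => intro mn mx; simp [scan3]
  | cons a tail ih =>
      intro mn mx
      match tail with
      | [] => simp [scan3]
      | [b] => simp [scan3]
      | b :: c :: r =>
          have hz : ((a :: b :: c :: r).zip (((a :: b :: c :: r).drop 1).zip
              ((a :: b :: c :: r).drop 2)))
              = (a, (b, c)) :: ((b :: c :: r).zip (((b :: c :: r).drop 1).zip
                  ((b :: c :: r).drop 2))) := by simp
          rw [hz, List.foldl_cons, scan3]
          by_cases h1 : a.1 < b.1 ∧ b.1 > c.1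
          · rw [if_pos h1]
            have : stepB (mn, mx) (a, (b, c))
                = (mn, mx ++ [PySem.Int.floordiv (b.2.1 + b.2.2) 2]) := by
              simp [stepB, h1]
            rw [this, ih]
          · by_cases h2 : a.1 > b.1 ∧ b.1 < c.1
            · rw [if_neg h1, if_pos h2]
              have : stepB (mn, mx) (a, (b, c))
                  = (mn ++ [PySem.Int.floordiv (b.2.1 + b.2.2) 2], mx) := by
                simp [stepB, h1, h2]
              rw [this, ih]
            · rw [if_neg h1, if_neg h2]
              have : stepB (mn, mx) (a, (b, c)) = (mn, mx) := by
                simp [stepB, h1, h2]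
              rw [this, ih]

lemma platFrom_head (rest : List Int) : ∀ (v s i : Int),
    ∃ e tail, platFrom v s i rest = (v, s, e) :: tail := by
  induction rest with
  | nil => intro v s i; exact ⟨i - 1, [], rfl⟩
  | cons x r ih =>
      intro v s i
      by_cases hx : x = v
      · obtain ⟨e, t, h⟩ := ih v s (i + 1)
        exact ⟨e, t, by rw [platFrom, if_pos hx]; exact h⟩
      · exact ⟨i - 1, platFrom x i (i + 1) r, by rw [platFrom, if_neg hx]⟩

lemma get_state_cases (a b : Int) :
    get_state a b = 0 ∨ get_state a b = 1 ∨ get_state a b = 2 := by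
  simp only [get_state]; split_ifs <;> omega

-- the main invariant: A's state machine = B's interior-plateau scan
lemma main_inv (rest : List Int) : ∀ (i prev pstart bg ps : Int) (mn mx : List Int)
    (lefts : List (Int × Int × Int)),
    ((lefts = [] ∧ ps = 0) ∨
     (∃ L ls le, lefts = [(L, ls, le)] ∧ ps = get_state L prev ∧ ps ≠ 0 ∧ bg = pstart)) →
    ((loopA (mn, mx, ps, bg) i prev rest).1, (loopA (mn, mx, ps, bg) i prev rest).2.1)
      = scan3 mn mx (lefts ++ platFrom prev pstart i rest) := by
  induction rest with
  | nil =>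
      intro i prev pstart bg ps mn mx lefts hinv
      rcases hinv with ⟨hl, _⟩ | ⟨L, ls, le, hl, _⟩ <;>
        simp [loopA, platFrom, hl, scan3]
  | cons x r ih =>
      intro i prev pstart bg ps mn mx lefts hinv
      rw [loopA]
      by_cases hs0 : get_state prev x = 0
      · -- neutral transition: x = prev
        have hxv : x = prev := by
          simp only [get_state] at hs0; split_ifs at hs0 <;> omega
        subst hxv
        have hstep : stepA (mn, mx, ps, bg) i x x = (mn, mx, ps, bg) := by
          simp [stepA, hs0]
        rw [hstep, platFrom, if_pos rfl]
        exact ih (i + 1) x pstart bg ps mn mx lefts hinv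
      · -- non-neutral transition
        have hxv : x ≠ prev := by
          intro h; apply hs0; simp [get_state, h]
        rw [platFrom, if_neg hxv]
        rcases hinv with ⟨hl, hps⟩ | ⟨L, ls, le, hl, hps, hne, hbg⟩
        · -- no left plateau yet: no append, state becomes (s, i)
          have hstep : stepA (mn, mx, ps, bg) i prev x = (mn, mx, get_state prev x, i) := by
            simp [stepA, hs0, hps]
          rw [hstep, hl]
          exact ih (i + 1) x i i (get_state prev x) mn mx [(prev, pstart, i - 1)]
            (Or.inr ⟨prev, pstart, i - 1, rfl, rfl, hs0, rfl⟩)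
        · -- one left plateau: compare directions
          obtain ⟨e, tl, hpf⟩ := platFrom_head r x i (i + 1)
          rw [hl]
          set s := get_state prev x with hsdef
          by_cases heq : ps = s
          · -- same direction: no append
            have hstep : stepA (mn, mx, ps, bg) i prev x = (mn, mx, s, i) := by
              simp [stepA, ← hsdef, hs0, heq]
            rw [hstep]
            have hmono : ¬((L < prev ∧ prev > x) ∨ (L > prev ∧ prev < x)) := by
              rw [heq, hsdef] at hps
              simp only [get_state] at hps
              split_ifs at hps <;> omega
            have hscan : scan3 mn mx ((L, ls, le) :: (prev, pstart, i - 1)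
                :: platFrom x i (i + 1) r)
                = scan3 mn mx ((prev, pstart, i - 1) :: platFrom x i (i + 1) r) := by
              rw [hpf, scan3]
              rw [if_neg (show ¬(L < prev ∧ prev > x) from fun h => hmono (Or.inl h)),
                  if_neg (show ¬(L > prev ∧ prev < x) from fun h => hmono (Or.inr h))]
            rw [show ((L, ls, le) :: (prev, pstart, i - 1) :: platFrom x i (i + 1) r
                  = [(L, ls, le)] ++ ((prev, pstart, i - 1) :: platFrom x i (i + 1) r)) from rfl] at hscan
            rw [hscan]
            have := ih (i + 1) x i i s mn mx [(prev, pstart, i - 1)]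
              (Or.inr ⟨prev, pstart, i - 1, rfl, rfl, hs0, rfl⟩)
            rw [this]; rfl
          · -- direction change: append the midpoint
            have hmid : PySem.Int.floordiv (bg + i - 1) 2
                = PySem.Int.floordiv (pstart + (i - 1)) 2 := by
              rw [hbg]; ring_nf
            by_cases hfall : s = 2
            · -- peak: rising then falling
              have hps1 : ps = 1 := by
                rw [hfall] at heq
                have h3 := get_state_cases L prev
                rw [← hps] at h3
                rcases h3 with h | h | h
                · exact absurd h hne
                · exact h
                · exact absurd h heq
              have hLp : L < prev := by
                rw [hps1] at hps
                simp only [get_state] at hps; split_ifs at hps <;> omega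
              have hpx : prev > x := by
                rw [hsdef] at hfall; simp only [get_state] at hfall
                split_ifs at hfall <;> omega
              have hstep : stepA (mn, mx, ps, bg) i prev x
                  = (mn, mx ++ [PySem.Int.floordiv (bg + i - 1) 2], s, i) := by
                simp [stepA, ← hsdef, hfall, hps1]
              rw [hstep]
              have hscan : scan3 mn mx ((L, ls, le) :: (prev, pstart, i - 1)
                  :: platFrom x i (i + 1) r)
                  = scan3 mn (mx ++ [PySem.Int.floordiv (pstart + (i - 1)) 2])
                      ((prev, pstart, i - 1) :: platFrom x i (i + 1) r) := by
                rw [hpf, scan3, if_pos ⟨hLp, hpx⟩]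
              rw [show ((L, ls, le) :: (prev, pstart, i - 1) :: platFrom x i (i + 1) r
                  = [(L, ls, le)] ++ ((prev, pstart, i - 1) :: platFrom x i (i + 1) r)) from rfl] at hscan
              rw [hscan, hmid]
              have := ih (i + 1) x i i s mn
                (mx ++ [PySem.Int.floordiv (pstart + (i - 1)) 2]) [(prev, pstart, i - 1)]
                (Or.inr ⟨prev, pstart, i - 1, rfl, rfl, hs0, rfl⟩)
              rw [this]; rfl
            · -- valley: falling then rising
              have hs1 : s = 1 := by
                rw [hsdef]; rw [hsdef] at hs0 hfall
                simp only [get_state] at hs0 hfall ⊢; split_ifs at * <;> omega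
              have hps2 : ps = 2 := by
                rw [hs1] at heq
                have h3 := get_state_cases L prev
                rw [← hps] at h3
                rcases h3 with h | h | h
                · exact absurd h hne
                · exact absurd h heq
                · exact h
              have hLp : L > prev := by
                rw [hps2] at hps; simp only [get_state] at hps
                split_ifs at hps <;> omega
              have hpx : prev < x := by
                rw [hsdef] at hs1; simp only [get_state] at hs1
                split_ifs at hs1 <;> omega
              have hstep : stepA (mn, mx, ps, bg) i prev x
                  = (mn ++ [PySem.Int.floordiv (bg + i - 1) 2], mx, s, i) := by
                simp [stepA, ← hsdef, hs1, hps2]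
              rw [hstep]
              have hscan : scan3 mn mx ((L, ls, le) :: (prev, pstart, i - 1)
                  :: platFrom x i (i + 1) r)
                  = scan3 (mn ++ [PySem.Int.floordiv (pstart + (i - 1)) 2]) mx
                      ((prev, pstart, i - 1) :: platFrom x i (i + 1) r) := by
                rw [hpf, scan3, if_neg (show ¬(L < prev ∧ prev > x) by omega), if_pos ⟨hLp, hpx⟩]
              rw [show ((L, ls, le) :: (prev, pstart, i - 1) :: platFrom x i (i + 1) r
                  = [(L, ls, le)] ++ ((prev, pstart, i - 1) :: platFrom x i (i + 1) r)) from rfl] at hscan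
              rw [hscan, hmid]
              have := ih (i + 1) x i i s
                (mn ++ [PySem.Int.floordiv (pstart + (i - 1)) 2]) mx [(prev, pstart, i - 1)]
                (Or.inr ⟨prev, pstart, i - 1, rfl, rfl, hs0, rfl⟩)
              rw [this]; rfl

-- ===== VERDICT (by name: the statement is the Claim_ definition above) =====
theorem turning_points_spec : Claim_equal_turning_points := by
  intro array _ hpre
  unfold Spec_turning_points
  unfold Pre_turning_points at hpre
  match array, hpre with
  | a0 :: a1 :: rest, _ =>
    -- A side
    have hA : turning_points (a0 :: a1 :: rest)
        = ((loopA ([], [], get_state a0 a1, 1) 2 a1 rest).1,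
           (loopA ([], [], get_state a0 a1, 1) 2 a1 rest).2.1) := by
      unfold turning_points
      have hconv := conv_loopA rest (a0 :: a1 :: rest) 1 a1
        ([], [], get_state (PySem.List.pyGetD (a0 :: a1 :: rest) 0 0)
          (PySem.List.pyGetD (a0 :: a1 :: rest) 1 0), 1) (by rfl)
      simp only [show ((1 : Nat) : Int) + 1 = 2 by norm_num] at hconv
      simp only [hconv]
      norm_num [PySem.List.pyGetD, PySem.List.pyIdx?]
    -- B side
    have hB : turning_points_alt (a0 :: a1 :: rest)
        = scan3 [] [] (platFrom a0 0 1 (a1 :: rest)) := by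
      unfold turning_points_alt
      have hc : (PySem.List.enumerate (a0 :: a1 :: rest) 0).foldl updP []
          = platFrom a0 0 1 (a1 :: rest) := by
        rw [PySem.List.enumerate_cons, List.foldl_cons]
        have h0 : updP [] (0, a0) = [] ++ [(a0, 0, (1 : Int) - 1)] := by
          simp [updP]
        rw [h0]
        simp only [zero_add]
        rw [compress_eq (a1 :: rest) [] a0 0 1]
        simp
      simp only [hc]
      rw [PySem.List.slice_from _ (by norm_num), PySem.List.slice_from _ (by norm_num)]
      exact zip3_scan _ [] []
    rw [hA, hB]
    by_cases h01 : a1 = a0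
    · subst h01
      rw [platFrom, if_pos rfl, show (1 : Int) + 1 = 2 by norm_num]
      have := main_inv rest 2 a1 0 1 (get_state a1 a1) [] [] []
        (Or.inl ⟨rfl, by simp [get_state]⟩)
      simpa using this
    · rw [platFrom, if_neg h01, show (1 : Int) + 1 = 2 by norm_num,
          show (1 : Int) - 1 = 0 by norm_num]
      have := main_inv rest 2 a1 1 1 (get_state a0 a1) [] [] [(a0, 0, 0)]
        (Or.inr ⟨a0, 0, 0, rfl, rfl,
          by simp only [get_state]; split_ifs <;> omega, rfl⟩)
      simpa using this
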